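-- pv_equiv track=rewrite | github.com/aidanr002/Emergency-Watch | EmergencyWatch/python serverside/scraper_cleanup.py | special_tag_removal
-- ===== SOURCE A (Python) =====
-- def special_tag_removal(event_content):
--     temp_event_content = ''
--     inside_wanted_word_range = False
--     for character in event_content:
--         #Checks if character is the start of replacable string
--         if character  == '<':
--             inside_wanted_word_range = True
--         if character == ">":
--             inside_wanted_word_range = False
--         if inside_wanted_word_range == False:
--             temp_event_content += character
--     return temp_event_content
-- ===== SOURCE B (Python) =====
-- def special_tag_removal(event_content):
--     n = len(event_content)
--     out = []
--     i = 0
--     while i < n: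
--         if event_content[i] == '<':
--             i += 1
--             while i < n and event_content[i] != '>':
--                 i += 1
--         else:
--             out.append(event_content[i])
--             i += 1
--     return ''.join(out)
-- ===== Notes on version B (the rewrite author's own statement) =====
-- stated objective: alternative
-- what changed: Replaces the per-character inside/outside boolean state machine with a skip-ahead scan: on '<' an inner loop jumps past the non-'>' run (leaving any '>' to be emitted), and kept characters are collected in a list joined once at the end instead of repeated string concatenation.
import Mathlib
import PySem

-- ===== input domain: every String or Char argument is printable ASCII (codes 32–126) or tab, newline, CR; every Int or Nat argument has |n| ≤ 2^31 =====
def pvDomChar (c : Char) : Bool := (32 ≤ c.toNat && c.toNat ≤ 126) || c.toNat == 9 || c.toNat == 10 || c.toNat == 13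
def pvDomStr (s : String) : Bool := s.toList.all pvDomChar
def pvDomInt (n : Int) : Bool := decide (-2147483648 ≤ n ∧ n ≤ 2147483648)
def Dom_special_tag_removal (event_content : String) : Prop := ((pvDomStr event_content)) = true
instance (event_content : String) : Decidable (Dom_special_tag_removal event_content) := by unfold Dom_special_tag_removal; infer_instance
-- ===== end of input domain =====

-- B replaces A's per-character inside/outside flag with a skip-ahead scan (inner loop jumping past each '<'-run); same result, alternative structure.


-- ===== PORT A =====
-- one loop step of A: update the flag on '<' / '>', then append the character when outside
def stepA (st : List Char × Bool) (c : Char) : List Char × Bool :=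
  let ins := if c = '<' then true else st.2
  let ins2 := if c = '>' then false else ins
  (if ins2 = false then st.1 ++ [c] else st.1, ins2)

def special_tag_removal (event_content : String) : String :=
  String.mk (event_content.toList.foldl stepA ([], false)).1

-- ===== PORT B =====
-- Source B's outer while loop as recursion on the remaining characters; the inner
-- skip loop (`while i < n and s[i] != '>'`) is the dropWhile jump
def goB : List Char → List Char
  | [] => []
  | c :: t =>
    if c = '<' then goB (t.dropWhile (· ≠ '>'))
    else c :: goB t
termination_by l => l.length
decreasing_by
  all_goals simp
  exact List.length_dropWhile_le _ _

def special_tag_removal_alt (event_content : String) : String :=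
  String.mk (goB event_content.toList)

-- ===== PRECONDITION & SPEC =====
def Spec_special_tag_removal (event_content : String) (out : String) : Prop := out = special_tag_removal_alt event_content
instance (event_content : String) (out : String) : Decidable (Spec_special_tag_removal event_content out) := by unfold Spec_special_tag_removal; infer_instance

-- ===== CLAIM (what is proved, stated in full; the proofs are below) =====
def Claim_equal_special_tag_removal : Prop := ∀ (event_content : String), Dom_special_tag_removal event_content → Spec_special_tag_removal event_content (special_tag_removal event_content)

-- ===== LEMMAS AND PROOFS =====

-- A's flag machine, with the accumulator peeled off
def fA (b : Bool) : List Char → List Char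
  | [] => []
  | c :: t =>
    let ins := if c = '<' then true else b
    let ins2 := if c = '>' then false else ins
    if ins2 = false then c :: fA ins2 t else fA ins2 t

theorem foldl_stepA (l : List Char) : ∀ (acc : List Char) (b : Bool),
    (l.foldl stepA (acc, b)).1 = acc ++ fA b l := by
  induction l with
  | nil => intro acc b; simp [fA]
  | cons c t ih =>
    intro acc b
    simp only [List.foldl_cons, stepA, fA]
    split_ifs with h <;> simp [ih]

theorem fA_true (l : List Char) : fA true l = fA false (l.dropWhile (· ≠ '>')) := by
  induction l with
  | nil => simp [fA]
  | cons c t ih =>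
    by_cases h : c = '>'
    · subst h; simp [fA, List.dropWhile]
    · simp [fA, List.dropWhile, h, ih]

theorem fA_false_eq_goB (l : List Char) : fA false l = goB l := by
  induction l using goB.induct with
  | case1 => simp [fA, goB]
  | case2 t ih =>
    rw [goB, if_pos rfl, ← ih, ← fA_true]
    simp [fA]
  | case3 c t h ih =>
    rw [goB, if_neg h, ← ih]
    by_cases hg : c = '>' <;> simp [fA, h, hg]

-- ===== VERDICT (by name: the statement is the Claim_ definition above) =====
theorem special_tag_removal_spec : Claim_equal_special_tag_removal := by
  intro s _
  unfold Spec_special_tag_removal special_tag_removal special_tag_removal_alt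
  rw [foldl_stepA, fA_false_eq_goB]
  rfl
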